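-- pv_equiv track=rewrite | github.com/pypi-data/pypi-mirror-279 | packages/p-vs-np-library/p_vs_np_library-0.1.tar.gz/p_vs_np_library-0.1/p_vs_np/database_problems/multiprocessor_processing.py | list_scheduling
-- ===== SOURCE A (Python) =====
-- def list_scheduling(num_processors, task_processing_times):
--     num_tasks = len(task_processing_times)
--     task_assignment = [None] * num_tasks
--     processor_loads = [0] * num_processors
--
--     # Sort tasks in descending order of processing time
--     sorted_tasks = sorted(range(num_tasks), key=lambda x: task_processing_times[x], reverse=True)
--
--     # Assign tasks to processors using List Scheduling
--     for task in sorted_tasks: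
--         min_load = min(processor_loads)
--         min_load_processor = processor_loads.index(min_load)
--
--         task_assignment[task] = min_load_processor
--         processor_loads[min_load_processor] += task_processing_times[task]
--
--     total_completion_time = max(processor_loads)
--
--     return task_assignment, total_completion_time
-- ===== SOURCE B (Python) =====
-- # Alternative exact re-implementation: instead of scanning all processor loads
-- # twice per task (min + .index), keep the processors as a queue of (load, processor)
-- # pairs kept sorted in ascending lexicographic order: the least-loaded processor
-- # with the lowest index is always queue[0]; after assigning, the updated pair is
-- # re-inserted at the position found by a hand-written binary search, and the
-- # makespan is queue[-1][0] at the end.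
--
-- def _insertion_point(q, item):
--     lo, hi = 0, len(q)
--     while lo < hi:
--         mid = (lo + hi) // 2
--         if q[mid] < item:
--             lo = mid + 1
--         else:
--             hi = mid
--     return lo
--
--
-- def list_scheduling(num_processors, task_processing_times):
--     n = len(task_processing_times)
--     queue = [(0, p) for p in range(num_processors)]
--     assignment = [None] * n
--     for task in sorted(range(n), key=lambda t: task_processing_times[t], reverse=True):
--         load, proc = queue.pop(0)
--         assignment[task] = proc
--         item = (load + task_processing_times[task], proc)
--         queue.insert(_insertion_point(queue, item), item)
--     return assignment, queue[-1][0]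
-- ===== Notes on version B (the rewrite author's own statement) =====
-- stated objective: faster
-- what changed: B replaces A's per-task pair of Python-level full scans over processor_loads (min() then .index()) by a queue of (load, processor) pairs kept in sorted lexicographic order: the target processor is always queue[0], the updated pair is re-inserted at the position found by a hand-written O(log p) binary search, and the makespan is read off as queue[-1][0] instead of max().
import Mathlib
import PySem

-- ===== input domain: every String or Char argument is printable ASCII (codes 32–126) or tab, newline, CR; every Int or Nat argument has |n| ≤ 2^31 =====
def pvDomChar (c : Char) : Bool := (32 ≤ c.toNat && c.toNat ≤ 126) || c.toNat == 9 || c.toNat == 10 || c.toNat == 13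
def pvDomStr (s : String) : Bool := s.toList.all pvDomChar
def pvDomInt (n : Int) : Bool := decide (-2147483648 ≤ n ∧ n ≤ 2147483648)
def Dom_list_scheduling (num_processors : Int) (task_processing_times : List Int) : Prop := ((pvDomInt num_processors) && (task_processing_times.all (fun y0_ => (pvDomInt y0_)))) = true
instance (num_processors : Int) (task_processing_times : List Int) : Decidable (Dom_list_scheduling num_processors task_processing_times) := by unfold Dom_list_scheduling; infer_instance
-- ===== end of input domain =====

-- B keeps the processors as a lexicographically sorted queue of (load, processor) pairs
-- (head = least-loaded, lowest-index processor; makespan = last load) instead of A's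
-- per-task min() + .index() scans over the load list; equivalence proved for num_processors ≥ 1.


-- ===== PORT A =====
-- loop body of A: pick min load (first occurrence), assign, bump that load.
-- [None]*n is modelled as replicate n 0: the loop assigns every index of range(n) exactly once.
-- min()/..index() are total here (loads nonempty under Pre_); .getD discharges the Option.
def aStep (ts : List Int) (st : List Int × List Int) (task : Int) : List Int × List Int :=
  let min_load := (PySem.List.min? st.2 (fun x => x)).getD 0
  let j := (PySem.List.index? st.2 min_load).getD 0
  (st.1.set task.toNat (j : Int),
   st.2.set j (st.2.getD j 0 + PySem.List.pyGetD ts task 0))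

def list_scheduling (num_processors : Int) (task_processing_times : List Int) : List Int × Int :=
  let n : Int := task_processing_times.length
  let task_assignment : List Int := List.replicate task_processing_times.length 0
  let processor_loads : List Int := List.replicate num_processors.toNat 0
  let sorted_tasks := PySem.List.sorted (PySem.List.pyRange 0 n 1)
      (fun x => PySem.List.pyGetD task_processing_times x 0) true
  let res := sorted_tasks.foldl (aStep task_processing_times) (task_assignment, processor_loads)
  (res.1, (PySem.List.max? res.2 (fun x => x)).getD 0)

-- ===== PORT B =====
-- Python tuple '<' on int pairs (lexicographic strict order)
def pairLt (a b : Int × Int) : Bool := a.1 < b.1 || (a.1 == b.1 && a.2 < b.2)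

-- _insertion_point: binary search for the first index with ¬(q[mid] < item)
-- (q[mid] is total here: 0 ≤ mid < hi ≤ len q on every call; getD discharges it)
def bisectLoop (q : List (Int × Int)) (item : Int × Int) (lo hi : Nat) : Nat :=
  if _h : lo < hi then
    let mid := (lo + hi) / 2
    if pairLt (q.getD mid (0, 0)) item then bisectLoop q item (mid + 1) hi
    else bisectLoop q item lo mid
  else lo
termination_by hi - lo
decreasing_by all_goals omega

-- queue.insert(_insertion_point(queue, item), item) on the popped queue
def qInsert (item : Int × Int) (q : List (Int × Int)) : List (Int × Int) :=
  let i := bisectLoop q item 0 q.length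
  q.take i ++ item :: q.drop i

-- loop body of B: take the head of the sorted queue, assign, re-insert updated pair.
-- queue[0] is total here (queue nonempty under Pre_); headD discharges it.
def bStep (ts : List Int) (st : List Int × List (Int × Int)) (task : Int) :
    List Int × List (Int × Int) :=
  let hd := st.2.headD (0, 0)
  (st.1.set task.toNat hd.2,
   qInsert (hd.1 + PySem.List.pyGetD ts task 0, hd.2) st.2.tail)

def list_scheduling_alt (num_processors : Int) (task_processing_times : List Int) : List Int × Int :=
  let n : Int := task_processing_times.length
  let queue : List (Int × Int) := (PySem.List.pyRange 0 num_processors 1).map (fun p => (0, p))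
  let assignment : List Int := List.replicate task_processing_times.length 0
  let sorted_tasks := PySem.List.sorted (PySem.List.pyRange 0 n 1)
      (fun x => PySem.List.pyGetD task_processing_times x 0) true
  let res := sorted_tasks.foldl (bStep task_processing_times) (assignment, queue)
  (res.1, (res.2.getLast?.getD (0, 0)).1)

-- ===== PRECONDITION & SPEC =====
-- Pre_: num_processors ≥ 1. For num_processors ≤ 0 processor_loads is empty and A always
-- raises ValueError (min() of an empty list, or max() when there are no tasks).
def Pre_list_scheduling (num_processors : Int) (task_processing_times : List Int) : Prop :=
  1 ≤ num_processors
instance (num_processors : Int) (task_processing_times : List Int) : Decidable (Pre_list_scheduling num_processors task_processing_times) := by unfold Pre_list_scheduling; infer_instance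

def pvWitness_list_scheduling : Int × List Int := (2, [3, 1, 4, 1, 5])

def Spec_list_scheduling (num_processors : Int) (task_processing_times : List Int) (out : List Int × Int) : Prop := out = list_scheduling_alt num_processors task_processing_times
instance (num_processors : Int) (task_processing_times : List Int) (out : List Int × Int) : Decidable (Spec_list_scheduling num_processors task_processing_times out) := by unfold Spec_list_scheduling; infer_instance

-- ===== CLAIM (what is proved, stated in full; the proofs are below) =====
def Claim_equal_list_scheduling : Prop := ∀ (num_processors : Int) (task_processing_times : List Int), Dom_list_scheduling num_processors task_processing_times → Pre_list_scheduling num_processors task_processing_times → Spec_list_scheduling num_processors task_processing_times (list_scheduling num_processors task_processing_times)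

-- ===== LEMMAS AND PROOFS =====

-- lexicographic (non-strict) order on pairs; the queue is Pairwise le2
def le2 (a b : Int × Int) : Prop := a.1 < b.1 ∨ (a.1 = b.1 ∧ a.2 ≤ b.2)

theorem le2_trans {a b c : Int × Int} (h1 : le2 a b) (h2 : le2 b c) : le2 a c := by
  unfold le2 at *; omega

theorem le2_antisymm {a b : Int × Int} (h1 : le2 a b) (h2 : le2 b a) : a = b := by
  unfold le2 at *
  have : a.1 = b.1 ∧ a.2 = b.2 := by omega
  exact Prod.ext this.1 this.2

theorem pairLt_true_le2 {a b : Int × Int} (h : pairLt a b = true) : le2 a b := by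
  unfold pairLt at h; unfold le2
  simp only [Bool.or_eq_true, Bool.and_eq_true, decide_eq_true_eq, beq_iff_eq] at h
  omega

theorem pairLt_false_le2 {a b : Int × Int} (h : pairLt a b = false) : le2 b a := by
  unfold pairLt at h; unfold le2
  simp only [Bool.or_eq_false_iff, Bool.and_eq_false_iff, decide_eq_false_iff_not,
    beq_eq_false_iff_ne, ne_eq] at h
  rcases h with ⟨h1, h2⟩
  rcases h2 with h2 | h2 <;> omega

theorem pairLt_iff_not_le2 {a b : Int × Int} : pairLt a b = true ↔ ¬ le2 b a := by
  unfold pairLt le2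
  simp only [Bool.or_eq_true, Bool.and_eq_true, decide_eq_true_eq, beq_iff_eq]
  omega

-- recursive reformulation of qInsert, used by the proofs
def qInsertRec (item : Int × Int) : List (Int × Int) → List (Int × Int)
  | [] => [item]
  | b :: l => if pairLt b item then b :: qInsertRec item l else item :: b :: l

theorem takeDrop_findIdx_eq_rec (item : Int × Int) : ∀ q : List (Int × Int),
    q.take (q.findIdx (fun b => !pairLt b item)) ++
      item :: q.drop (q.findIdx (fun b => !pairLt b item)) = qInsertRec item q := by
  intro q
  induction q with
  | nil => rfl
  | cons b t ih =>
    by_cases h : pairLt b item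
    · simp [qInsertRec, List.findIdx_cons, h] at ih ⊢
      exact ih
    · simp [qInsertRec, List.findIdx_cons, h]

-- the binary search finds the same index as the linear scan on a sorted queue
theorem bisectLoop_eq_findIdx {q : List (Int × Int)} {item : Int × Int}
    (hs : q.Pairwise le2) : ∀ lo hi, lo ≤ hi → hi ≤ q.length →
    lo ≤ q.findIdx (fun b => !pairLt b item) → q.findIdx (fun b => !pairLt b item) ≤ hi →
    bisectLoop q item lo hi = q.findIdx (fun b => !pairLt b item) := by
  intro lo hi
  induction hlh : hi - lo using Nat.strong_induction_on generalizing lo hi with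
  | _ n ih =>
  intro h1 h2 h3 h4
  by_cases hlt : lo < hi
  · have hmid : (lo + hi) / 2 < hi := by omega
    have hmidq : (lo + hi) / 2 < q.length := by omega
    have hgetD : q.getD ((lo + hi) / 2) (0, 0) = q[(lo + hi) / 2] := by
      rw [List.getD_eq_getElem?_getD, List.getElem?_eq_getElem hmidq]; rfl
    by_cases hc : pairLt q[(lo + hi) / 2] item
    · rw [bisectLoop, dif_pos hlt]
      simp only [hgetD, hc, if_true]
      have hmF : (lo + hi) / 2 < q.findIdx (fun b => !pairLt b item) := by
        by_contra hle
        push Not at hle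
        have hFq : q.findIdx (fun b => !pairLt b item) < q.length := by omega
        have hpF := List.findIdx_getElem (p := fun b => !pairLt b item) (w := hFq)
        have hfalse : pairLt q[q.findIdx (fun b => !pairLt b item)] item = false := by
          simpa using hpF
        rcases Nat.eq_or_lt_of_le hle with heq | hltF
        · have hE : q[q.findIdx (fun b => !pairLt b item)]'hFq = q[(lo + hi) / 2]'hmidq := by
            simp only [heq]
          rw [hE] at hfalse
          rw [hfalse] at hc
          cases hc
        · have hle2 := List.pairwise_iff_getElem.1 hs _ _ hFq hmidq hltF
          exact (pairLt_iff_not_le2.1 hc) (le2_trans (pairLt_false_le2 hfalse) hle2)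
      exact ih (hi - ((lo + hi) / 2 + 1)) (by omega) _ _ rfl (by omega) h2 (by omega) h4
    · rw [bisectLoop, dif_pos hlt]
      simp only [hgetD, hc, if_false]
      have hmF : q.findIdx (fun b => !pairLt b item) ≤ (lo + hi) / 2 := by
        by_contra hgt
        push Not at hgt
        have := List.not_of_lt_findIdx (xs := q) (i := (lo + hi) / 2) hgt
        simp only [Bool.not_eq_eq_eq_not, Bool.not_true, Bool.not_eq_false] at this
        exact hc this
      exact ih ((lo + hi) / 2 - lo) (by omega) _ _ rfl (by omega) (by omega) h3 hmF
  · rw [bisectLoop, dif_neg hlt]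
    omega

theorem qInsert_eq_rec (item : Int × Int) (q : List (Int × Int)) (hs : q.Pairwise le2) :
    qInsert item q = qInsertRec item q := by
  unfold qInsert
  rw [bisectLoop_eq_findIdx hs 0 q.length (Nat.zero_le _) le_rfl (Nat.zero_le _)
    List.findIdx_le_length]
  exact takeDrop_findIdx_eq_rec item q

-- the processor multiset: loads as (load, index) pairs
def enumL (loads : List Int) : List (Int × Int) :=
  loads.zipIdx.map (fun p => (p.1, (p.2 : Int)))

theorem length_enumL (loads : List Int) : (enumL loads).length = loads.length := by
  simp [enumL]

theorem getElem_enumL (loads : List Int) (k : Nat) (hk : k < loads.length) :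
    (enumL loads)[k]'(by simpa [length_enumL] using hk) = (loads[k], (k : Int)) := by
  simp [enumL]

theorem mem_enumL {loads : List Int} {x : Int × Int} :
    x ∈ enumL loads ↔ ∃ k : Nat, ∃ hk : k < loads.length, loads[k] = x.1 ∧ (k : Int) = x.2 := by
  constructor
  · intro hx
    rcases List.getElem_of_mem hx with ⟨k, hk, hget⟩
    have hk' : k < loads.length := by simpa [length_enumL] using hk
    refine ⟨k, hk', ?_, ?_⟩
    · have := (getElem_enumL loads k hk').symm.trans hget
      exact (congrArg Prod.fst this)
    · have := (getElem_enumL loads k hk').symm.trans hget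
      exact (congrArg Prod.snd this)
  · rintro ⟨k, hk, h1, h2⟩
    have : (enumL loads)[k]'(by simpa [length_enumL] using hk) = x := by
      rw [getElem_enumL loads k hk]; exact Prod.ext h1 h2
    exact this ▸ List.getElem_mem _

def QInv (loads : List Int) (queue : List (Int × Int)) : Prop :=
  queue.Pairwise le2 ∧ queue.Perm (enumL loads)

theorem mem_qInsert {a x : Int × Int} {l : List (Int × Int)} :
    x ∈ qInsertRec a l ↔ x = a ∨ x ∈ l := by
  induction l with
  | nil => simp [qInsertRec]
  | cons b t ih =>
    by_cases h : pairLt b a <;> simp [qInsertRec, h, ih] <;> tauto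

theorem qInsertRec_perm (a : Int × Int) (l : List (Int × Int)) :
    (qInsertRec a l).Perm (a :: l) := by
  induction l with
  | nil => simp [qInsertRec]
  | cons b t ih =>
    by_cases h : pairLt b a
    · simpa [qInsertRec, h] using (ih.cons b).trans (List.Perm.swap a b t)
    · simp [qInsertRec, h]

theorem qInsert_perm (a : Int × Int) (l : List (Int × Int)) (hs : l.Pairwise le2) :
    (qInsert a l).Perm (a :: l) := by
  rw [qInsert_eq_rec a l hs]
  exact qInsertRec_perm a l

theorem qInsertRec_pairwise {a : Int × Int} {l : List (Int × Int)} (h : l.Pairwise le2) :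
    (qInsertRec a l).Pairwise le2 := by
  induction l with
  | nil => simp [qInsertRec]
  | cons b t ih =>
    rcases List.pairwise_cons.1 h with ⟨hb, ht⟩
    by_cases hlt : pairLt b a
    · rw [qInsertRec, if_pos hlt]
      refine List.pairwise_cons.2 ⟨?_, ih ht⟩
      intro x hx
      rcases mem_qInsert.1 hx with rfl | hx
      · exact pairLt_true_le2 hlt
      · exact hb x hx
    · rw [qInsertRec, if_neg hlt]
      refine List.pairwise_cons.2 ⟨?_, h⟩
      intro x hx
      rcases List.mem_cons.1 hx with rfl | hx
      · exact pairLt_false_le2 (by simpa using hlt)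
      · exact le2_trans (pairLt_false_le2 (by simpa using hlt)) (hb x hx)

theorem qInsert_pairwise {a : Int × Int} {l : List (Int × Int)} (h : l.Pairwise le2) :
    (qInsert a l).Pairwise le2 := by
  rw [qInsert_eq_rec a l h]
  exact qInsertRec_pairwise h

-- A's selection: minimum load and its first index
def selM (loads : List Int) : Int := (PySem.List.min? loads (fun x => x)).getD 0
def selJ (loads : List Int) : Nat := (PySem.List.index? loads (selM loads)).getD 0

theorem sel_spec {loads : List Int} (hne : loads ≠ []) :
    ∃ hj : selJ loads < loads.length,
      loads[selJ loads] = selM loads ∧ (∀ y ∈ loads, selM loads ≤ y) ∧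
      (∀ i (hi : i < selJ loads), loads[i]'(by omega) ≠ selM loads) := by
  obtain ⟨m, hm⟩ : ∃ m, PySem.List.min? loads (fun x => x) = some m := by
    cases h : PySem.List.min? loads (fun x => x) with
    | none => exact absurd ((PySem.List.min?_eq_none_iff _ _).1 h) hne
    | some m => exact ⟨m, rfl⟩
  have hmem : m ∈ loads := PySem.List.min?_mem hm
  have hmin : ∀ y ∈ loads, m ≤ y := PySem.List.min?_isMin hm
  have hM : selM loads = m := by simp [selM, hm]
  obtain ⟨j, hj⟩ : ∃ j, PySem.List.index? loads (selM loads) = some j := by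
    cases h : PySem.List.index? loads (selM loads) with
    | none => rw [PySem.List.index?_eq_none_iff _ _] at h; rw [hM] at h; exact absurd hmem h
    | some j => exact ⟨j, rfl⟩
  obtain ⟨hjl, hget, hfirst⟩ := PySem.List.getElem_of_index?_eq_some hj
  have hJ : selJ loads = j := by unfold selJ; rw [hj]; rfl
  subst hJ
  refine ⟨hjl, hget, ?_, hfirst⟩
  rw [hM]; exact hmin

theorem perm_set_cons_eraseIdx : ∀ (l : List (Int × Int)) (i : Nat), i < l.length →
    ∀ v, (l.set i v).Perm (v :: l.eraseIdx i) := by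
  intro l
  induction l with
  | nil => intro i hi; simp at hi
  | cons a t ih =>
    intro i hi v
    cases i with
    | zero => simp
    | succ i =>
      simp only [List.set_cons_succ, List.eraseIdx_cons_succ]
      exact ((ih i (by simpa using hi) v).cons a).trans (List.Perm.swap v a _)

theorem perm_cons_eraseIdx (l : List (Int × Int)) (i : Nat) (hi : i < l.length) :
    l.Perm (l[i] :: l.eraseIdx i) := by
  have := perm_set_cons_eraseIdx l i hi l[i]
  simpa using this

theorem enumL_set (loads : List Int) (j : Nat) (hj : j < loads.length) (v : Int) :
    enumL (loads.set j v) = (enumL loads).set j (v, (j : Int)) := by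
  apply List.ext_getElem
  · simp [length_enumL]
  · intro k h1 h2
    have hk : k < loads.length := by simpa [length_enumL] using h2
    have hks : k < (loads.set j v).length := by simpa using hk
    rw [getElem_enumL (loads.set j v) k (by simpa using hk), List.getElem_set,
      List.getElem_set]
    split
    · simp_all
    · rw [getElem_enumL loads k hk]

theorem head_eq {loads : List Int} {queue : List (Int × Int)} (hne : loads ≠ [])
    (hinv : QInv loads queue) :
    queue.headD (0, 0) = (selM loads, (selJ loads : Int)) := by
  obtain ⟨hj, hget, hmin, hfirst⟩ := sel_spec hne
  have hmj : (selM loads, (selJ loads : Int)) ∈ enumL loads :=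
    mem_enumL.2 ⟨selJ loads, hj, hget, rfl⟩
  cases queue with
  | nil =>
    exfalso
    have := hinv.2.length_eq
    simp [length_enumL] at this
    exact hne (List.eq_nil_of_length_eq_zero this.symm)
  | cons q0 qt =>
    simp only [List.headD_cons]
    have hq0mem : q0 ∈ enumL loads := hinv.2.mem_iff.1 (List.mem_cons_self)
    obtain ⟨i, hi, hi1, hi2⟩ := mem_enumL.1 hq0mem
    have h1 : le2 (selM loads, (selJ loads : Int)) q0 := by
      unfold le2
      simp only
      rcases lt_or_eq_of_le (hmin q0.1 (hi1 ▸ List.getElem_mem hi)) with h | h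
      · exact Or.inl h
      · refine Or.inr ⟨h, ?_⟩
        rw [← hi2]
        have : ¬ i < selJ loads := fun hlt => hfirst i hlt (by rw [hi1, ← h])
        omega
    have h2 : le2 q0 (selM loads, (selJ loads : Int)) := by
      rcases List.mem_cons.1 (hinv.2.mem_iff.2 hmj) with h | h
      · rw [← h]; unfold le2; omega
      · exact (List.pairwise_cons.1 hinv.1).1 _ h
    exact le2_antisymm h2 h1

theorem step_inv {loads : List Int} {queue : List (Int × Int)} (hne : loads ≠ [])
    (hinv : QInv loads queue) (t : Int) :
    QInv (loads.set (selJ loads) (selM loads + t))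
      (qInsert (selM loads + t, (selJ loads : Int)) queue.tail) := by
  obtain ⟨hj, hget, hmin, hfirst⟩ := sel_spec hne
  have hhead := head_eq hne hinv
  cases queue with
  | nil =>
    exfalso
    have := hinv.2.length_eq
    simp [length_enumL] at this
    exact hne (List.eq_nil_of_length_eq_zero this.symm)
  | cons q0 qt =>
    have hq0 : q0 = (selM loads, (selJ loads : Int)) := by simpa using hhead
    subst hq0
    have hjE : selJ loads < (enumL loads).length := by simpa [length_enumL] using hj
    have hEget : (enumL loads)[selJ loads]'hjE = (selM loads, (selJ loads : Int)) := by
      rw [getElem_enumL loads _ hj, hget]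
    have hqt : qt.Perm ((enumL loads).eraseIdx (selJ loads)) := by
      have h1 : ((selM loads, (selJ loads : Int)) :: qt).Perm
          ((selM loads, (selJ loads : Int)) :: (enumL loads).eraseIdx (selJ loads)) :=
        hinv.2.trans (hEget ▸ perm_cons_eraseIdx (enumL loads) (selJ loads) hjE)
      exact h1.cons_inv
    constructor
    · exact qInsert_pairwise (List.Pairwise.of_cons hinv.1)
    · refine (qInsert_perm _ _ (List.Pairwise.of_cons hinv.1)).trans ?_
      have h2 : (enumL (loads.set (selJ loads) (selM loads + t))).Perm
          ((selM loads + t, (selJ loads : Int)) :: (enumL loads).eraseIdx (selJ loads)) := by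
        rw [enumL_set loads _ hj]
        exact perm_set_cons_eraseIdx (enumL loads) (selJ loads) hjE _
      exact ((hqt.cons _).trans h2.symm)

theorem last_eq {loads : List Int} {queue : List (Int × Int)} (hne : loads ≠ [])
    (hinv : QInv loads queue) :
    (queue.getLast?.getD (0, 0)).1 = (PySem.List.max? loads (fun x => x)).getD 0 := by
  obtain ⟨M, hM⟩ : ∃ M, PySem.List.max? loads (fun x => x) = some M := by
    cases h : PySem.List.max? loads (fun x => x) with
    | none => exact absurd ((PySem.List.max?_eq_none_iff _ _).1 h) hne
    | some M => exact ⟨M, rfl⟩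
  have hMmem : M ∈ loads := PySem.List.max?_mem hM
  have hMmax : ∀ y ∈ loads, y ≤ M := PySem.List.max?_isMax hM
  rw [hM, Option.getD_some]
  have hrev : queue.reverse.Pairwise (fun a b => le2 b a) := by
    rw [List.pairwise_reverse]; exact hinv.1
  cases hq : queue.reverse with
  | nil =>
    exfalso
    have hqe : queue = [] := by simpa using congrArg List.reverse hq
    have := hinv.2.length_eq
    rw [hqe] at this
    simp [length_enumL] at this
    exact hne (List.eq_nil_of_length_eq_zero this.symm)
  | cons L rest =>
    have hlast : queue.getLast? = some L := by
      rw [← List.head?_reverse, hq, List.head?_cons]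
    rw [hlast, Option.getD_some]
    have hLmem : L ∈ enumL loads := by
      refine hinv.2.mem_iff.1 ?_
      have : L ∈ queue.reverse := by rw [hq]; exact List.mem_cons_self
      simpa using this
    obtain ⟨i, hi, hi1, _⟩ := mem_enumL.1 hLmem
    have hL1 : L.1 ≤ M := hMmax _ (hi1 ▸ List.getElem_mem hi)
    obtain ⟨k, hk, hkget⟩ := List.getElem_of_mem hMmem
    have hMk : (M, (k : Int)) ∈ queue := hinv.2.mem_iff.2 (mem_enumL.2 ⟨k, hk, hkget, rfl⟩)
    have hle : le2 (M, (k : Int)) L := by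
      have : (M, (k : Int)) ∈ queue.reverse := by simpa using hMk
      rw [hq] at this
      rcases List.mem_cons.1 this with h | h
      · rw [h]; unfold le2; omega
      · have hrev' : (L :: rest).Pairwise (fun a b => le2 b a) := hq ▸ hrev
        exact (List.pairwise_cons.1 hrev').1 _ h
    unfold le2 at hle
    simp only at hle
    omega

-- one step of each fold, under the invariant
theorem fold_eq (ts : List Int) : ∀ (l : List Int) (assign : List Int) (loads : List Int)
    (queue : List (Int × Int)), loads ≠ [] → QInv loads queue →
    (l.foldl (aStep ts) (assign, loads)).1 = (l.foldl (bStep ts) (assign, queue)).1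
    ∧ (l.foldl (aStep ts) (assign, loads)).2 ≠ []
    ∧ QInv (l.foldl (aStep ts) (assign, loads)).2 (l.foldl (bStep ts) (assign, queue)).2 := by
  intro l
  induction l with
  | nil => intro assign loads queue hne hinv; exact ⟨rfl, hne, hinv⟩
  | cons task l ih =>
    intro assign loads queue hne hinv
    obtain ⟨hj, hget, _, _⟩ := sel_spec hne
    have hstepA : aStep ts (assign, loads) task =
        (assign.set task.toNat ((selJ loads : Int)),
         loads.set (selJ loads) (selM loads + PySem.List.pyGetD ts task 0)) := by
      simp only [aStep, selM, selJ]
      have : loads.getD ((PySem.List.index? loads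
          ((PySem.List.min? loads (fun x => x)).getD 0)).getD 0) 0 =
          (PySem.List.min? loads (fun x => x)).getD 0 := by
        have h2 := hget
        simp only [selM, selJ] at h2
        rw [List.getD_eq_getElem?_getD, List.getElem?_eq_getElem (by
          have := hj; simpa [selJ, selM] using this)]
        simpa using h2
      rw [this]
    have hstepB : bStep ts (assign, queue) task =
        (assign.set task.toNat ((selJ loads : Int)),
         qInsert (selM loads + PySem.List.pyGetD ts task 0, (selJ loads : Int)) queue.tail) := by
      simp only [bStep, head_eq hne hinv]
    rw [List.foldl_cons, List.foldl_cons, hstepA, hstepB]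
    exact ih _ _ _ (by
        intro h
        have := congrArg List.length h
        simp at this
        exact hne this)
      (step_inv hne hinv _)

theorem initial_queue (P : Int) :
    (PySem.List.pyRange 0 P 1).map (fun p => ((0 : Int), p)) = enumL (List.replicate P.toNat 0) := by
  rw [PySem.List.pyRange_one]
  apply List.ext_getElem
  · simp [length_enumL]
  · intro k h1 h2
    have hk : k < P.toNat := by simpa using h1
    rw [getElem_enumL _ k (by simpa using hk)]
    simp

theorem initial_pairwise (P : Int) :
    ((PySem.List.pyRange 0 P 1).map (fun p => ((0 : Int), p))).Pairwise le2 := by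
  rw [List.pairwise_map]
  refine (PySem.List.pairwise_lt_pyRange_one 0 P).imp ?_
  intro a b hab
  unfold le2
  exact Or.inr ⟨rfl, le_of_lt hab⟩

theorem list_scheduling_spec : Claim_equal_list_scheduling := by
  unfold Claim_equal_list_scheduling
  intro P ts _hdom hpre
  unfold Spec_list_scheduling Pre_list_scheduling at *
  simp only [list_scheduling, list_scheduling_alt]
  have hne : (List.replicate P.toNat (0 : Int)) ≠ [] := by
    have : 1 ≤ P.toNat := by omega
    simp [List.replicate_eq_nil_iff]
    omega
  have hinv : QInv (List.replicate P.toNat 0)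
      ((PySem.List.pyRange 0 P 1).map (fun p => ((0 : Int), p))) :=
    ⟨initial_pairwise P, by rw [initial_queue P]⟩
  obtain ⟨h1, h2, h3⟩ := fold_eq ts
    (PySem.List.sorted (PySem.List.pyRange 0 (ts.length : Int) 1)
      (fun x => PySem.List.pyGetD ts x 0) true)
    (List.replicate ts.length 0) (List.replicate P.toNat 0)
    ((PySem.List.pyRange 0 P 1).map (fun p => ((0 : Int), p))) hne hinv
  refine Prod.ext h1 ?_
  simpa using (last_eq h2 h3).symm
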